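-- pv_equiv track=rewrite | github.com/TheNamesAlex/Codewars | 3kyu_TheMillionthFibonacciKata.py | helper
-- ===== SOURCE A (Python) =====
-- def helper(n):
--     if n == 0:
--         return (0, 1)
--     else:
--         a, b = helper(n // 2)
--         c = a * (b * 2 - a)
--         d = a * a + b * b
--         if n % 2 == 0:
--             return (c, d)
--         else:
--             return (d, c + d)
-- ===== SOURCE B (Python) =====
-- def helper(n):
--     # Iterative fast-doubling: walk the binary digits of n MSB->LSB.
--     a, b = 0, 1
--     for bit in bin(n)[2:]:
--         c = a * (2 * b - a)
--         d = a * a + b * b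
--         if bit == '1':
--             a, b = d, c + d
--         else:
--             a, b = c, d
--     return (a, b)
-- ===== Notes on version B (the rewrite author's own statement) =====
-- stated objective: alternative
-- what changed: Replaced the n//2 recursion by an iterative fast-doubling loop over the binary digits of n from the most significant bit down, keeping the pair (F(k),F(k+1)) as the loop state.
import Mathlib
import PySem

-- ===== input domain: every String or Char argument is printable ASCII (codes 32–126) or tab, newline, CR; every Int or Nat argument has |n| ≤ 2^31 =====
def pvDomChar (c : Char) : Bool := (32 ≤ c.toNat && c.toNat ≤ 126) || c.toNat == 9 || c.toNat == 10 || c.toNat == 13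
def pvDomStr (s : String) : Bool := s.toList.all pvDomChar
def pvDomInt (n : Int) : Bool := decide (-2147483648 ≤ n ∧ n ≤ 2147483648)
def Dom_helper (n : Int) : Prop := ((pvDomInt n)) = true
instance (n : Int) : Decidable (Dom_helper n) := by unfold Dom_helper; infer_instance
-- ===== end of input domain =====

-- B replaces A's n//2 recursion by an iterative fast-doubling loop over the binary
-- digits of n, MSB first (objective: alternative decomposition, same cost).

-- ===== PORT A =====
-- A recurses on n//2; for n < 0 Python never reaches the base case (RecursionError),
-- so the port carries a fuel counter (n.toNat + 1, sufficient for all n ≥ 0).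
def helperGo : Nat → Int → Int × Int
  | 0, _ => (0, 1)
  | fuel + 1, n =>
    if n = 0 then (0, 1)
    else
      let p := helperGo fuel (PySem.Int.floordiv n 2)
      let a := p.1
      let b := p.2
      let c := a * (b * 2 - a)
      let d := a * a + b * b
      if PySem.Int.mod n 2 = 0 then (c, d) else (d, c + d)

def helper (n : Int) : Int × Int := helperGo (n.toNat + 1) n

-- ===== PORT B =====
-- Hand port of Python's bin(): binary digits MSB first ('0' for m = 0);
-- fuel m is enough since a positive m has at most m binary digits.
def binAuxGo : Nat → Nat → List Char
  | 0, _ => []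
  | fuel + 1, m =>
    if m = 0 then []
    else binAuxGo fuel (m / 2) ++ [if m % 2 = 1 then '1' else '0']

def binDigits (m : Nat) : List Char := if m = 0 then ['0'] else binAuxGo m m

-- bin(n) as a char list: '-0b…' for negative n, '0b…' otherwise (exact for every Int)
def pyBin (n : Int) : List Char :=
  if n < 0 then '-' :: '0' :: 'b' :: binDigits n.natAbs
  else '0' :: 'b' :: binDigits n.toNat

-- one iteration of B's loop body
def fdStep (p : Int × Int) (bit : Char) : Int × Int :=
  let a := p.1
  let b := p.2
  let c := a * (2 * b - a)
  let d := a * a + b * b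
  if bit = '1' then (d, c + d) else (c, d)

def helper_alt (n : Int) : Int × Int :=
  ((pyBin n).drop 2).foldl fdStep (0, 1)

-- ===== PRECONDITION & SPEC =====
-- Pre_ excludes n < 0, on which Python A recurses forever (RecursionError).
def Pre_helper (n : Int) : Prop := 0 ≤ n
instance (n : Int) : Decidable (Pre_helper n) := by unfold Pre_helper; infer_instance
def pvWitness_helper : Int := 10

def Spec_helper (n : Int) (out : Int × Int) : Prop := out = helper_alt n
instance (n : Int) (out : Int × Int) : Decidable (Spec_helper n out) := by unfold Spec_helper; infer_instance

-- ===== CLAIM (what is proved, stated in full; the proofs are below) =====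
def Claim_equal_helper : Prop := ∀ (n : Int), Dom_helper n → Pre_helper n → Spec_helper n (helper n)

-- ===== LEMMAS AND PROOFS =====

-- fuel sufficiency for the bin() port: any fuel ≥ m gives the same digit list
theorem binAuxGo_fuel (m : Nat) : ∀ f g, m ≤ f → m ≤ g → binAuxGo f m = binAuxGo g m := by
  induction m using Nat.strong_induction_on with
  | _ m ih =>
    intro f g hf hg
    match m, f, g with
    | 0, f, g => cases f <;> cases g <;> rfl
    | k + 1, f + 1, g + 1 =>
      simp only [binAuxGo]
      rw [if_neg (by omega : ¬(k + 1 = 0)), if_neg (by omega : ¬(k + 1 = 0)),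
        ih ((k + 1) / 2) (by omega) f g (by omega) (by omega)]

theorem binAuxGo_step (m : Nat) (hm : m ≠ 0) :
    binAuxGo m m = binAuxGo (m / 2) (m / 2) ++ [if m % 2 = 1 then '1' else '0'] := by
  match m with
  | k + 1 =>
    simp only [binAuxGo]
    rw [if_neg (by omega : ¬(k + 1 = 0)),
      binAuxGo_fuel ((k + 1) / 2) k ((k + 1) / 2) (by omega) le_rfl]

-- B's fold over the digits of m
def G (m : Nat) : Int × Int := (binAuxGo m m).foldl fdStep (0, 1)

theorem G_zero : G 0 = (0, 1) := rfl

theorem G_step (m : Nat) (hm : m ≠ 0) :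
    G m = fdStep (G (m / 2)) (if m % 2 = 1 then '1' else '0') := by
  unfold G
  rw [binAuxGo_step m hm]
  simp [List.foldl_append]

theorem alt_eq_G (n : Int) (h : 0 ≤ n) : helper_alt n = G n.toNat := by
  unfold helper_alt pyBin
  rw [if_neg (by omega)]
  simp only [List.drop]
  unfold binDigits
  by_cases h0 : n.toNat = 0
  · simp [h0, G, binAuxGo, fdStep]
  · simp [h0, G]

theorem helperGo_eq_G (fuel : Nat) (n : Int) (h0 : 0 ≤ n) (hf : n.toNat < fuel) :
    helperGo fuel n = G n.toNat := by
  induction fuel generalizing n with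
  | zero => omega
  | succ fuel ih =>
    by_cases hn : n = 0
    · simp [helperGo, hn, G_zero]
    · have hm : n.toNat ≠ 0 := by omega
      have hcast : n = ((n.toNat : Nat) : Int) := by omega
      have hdiv : PySem.Int.floordiv n 2 = ((n.toNat / 2 : Nat) : Int) := by
        rw [hcast]; exact_mod_cast PySem.Int.floordiv_natCast n.toNat 2
      have hmod : PySem.Int.mod n 2 = ((n.toNat % 2 : Nat) : Int) := by
        rw [hcast]; exact_mod_cast PySem.Int.mod_natCast n.toNat 2
      have hrec : helperGo fuel (PySem.Int.floordiv n 2) = G (n.toNat / 2) := by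
        rw [hdiv]
        have := ih ((n.toNat / 2 : Nat) : Int) (by positivity) (by simp; omega)
        simp only [Int.toNat_natCast] at this
        exact this
      rw [G_step n.toNat hm]
      simp only [helperGo, hn, if_false, hrec, hmod]
      by_cases hpar : n.toNat % 2 = 1
      · rw [if_neg (by omega), if_pos hpar]
        show _ = ((G (n.toNat / 2)).1 * (G (n.toNat / 2)).1 + (G (n.toNat / 2)).2 * (G (n.toNat / 2)).2,
          (G (n.toNat / 2)).1 * (2 * (G (n.toNat / 2)).2 - (G (n.toNat / 2)).1) +
            ((G (n.toNat / 2)).1 * (G (n.toNat / 2)).1 + (G (n.toNat / 2)).2 * (G (n.toNat / 2)).2))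
        rw [Prod.ext_iff]
        exact ⟨by ring_nf, by ring⟩
      · rw [if_pos (by omega), if_neg hpar]
        show _ = ((G (n.toNat / 2)).1 * (2 * (G (n.toNat / 2)).2 - (G (n.toNat / 2)).1),
          (G (n.toNat / 2)).1 * (G (n.toNat / 2)).1 + (G (n.toNat / 2)).2 * (G (n.toNat / 2)).2)
        rw [Prod.ext_iff]
        exact ⟨by ring, by ring_nf⟩

-- ===== VERDICT (by name: the statement is the Claim_ definition above) =====
theorem helper_spec : Claim_equal_helper := by
  intro n _ hpre
  unfold Spec_helper helper
  rw [helperGo_eq_G (n.toNat + 1) n hpre (by omega), alt_eq_G n hpre]
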